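-- pv_equiv track=rewrite | github.com/marcandrevigneault/openroast | backend/src/openroast/simulator/register_map.py | _int_to_bcd
-- ===== SOURCE A (Python) =====
-- def _int_to_bcd(value: int) -> int:
--     """Encode an integer as BCD in a 16-bit register.
--
--     Args:
--         value: Non-negative integer (e.g. 215 → 0x0215).
--
--     Returns:
--         BCD-encoded 16-bit value.
--     """
--     if value < 0:
--         value = 0
--     result = 0
--     shift = 0
--     while value > 0:
--         digit = value % 10
--         result |= digit << shift
--         shift += 4
--         value //= 10
--     return result
-- ===== SOURCE B (Python) =====
-- def _int_to_bcd(value: int) -> int: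
--     if value <= 0:
--         return 0
--     return (_int_to_bcd(value // 10) << 4) | (value % 10)
-- ===== Notes on version B (the rewrite author's own statement) =====
-- stated objective: simpler
-- what changed: Replaces A's iterative loop with a running shift offset and result |= digit << shift accumulation by a short direct recursion that shifts the already-built prefix left one nibble and ORs in the low digit; no result/shift state variables.
import Mathlib
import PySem

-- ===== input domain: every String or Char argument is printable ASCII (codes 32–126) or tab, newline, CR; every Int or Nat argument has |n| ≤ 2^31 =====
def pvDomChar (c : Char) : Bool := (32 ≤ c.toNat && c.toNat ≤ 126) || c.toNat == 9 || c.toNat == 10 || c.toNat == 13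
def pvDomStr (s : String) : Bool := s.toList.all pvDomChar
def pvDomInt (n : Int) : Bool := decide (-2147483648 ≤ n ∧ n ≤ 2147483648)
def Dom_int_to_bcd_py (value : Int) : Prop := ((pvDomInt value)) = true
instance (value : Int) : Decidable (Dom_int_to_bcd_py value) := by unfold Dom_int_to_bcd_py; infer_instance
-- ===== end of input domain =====

-- B replaces A's while-loop (result/shift accumulators, digit OR-ed in at a growing offset)
-- by a direct recursion that shifts the already-built prefix left one nibble; objective: simpler.

-- ===== PORT A =====
-- the while-loop of A: state (value, result, shift); Python's shift is an int that only ever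
-- holds 0,4,8,… here, so it is carried as a Nat (Python '<<' with this shift = Lean '<<<')
def intToBcdLoopA (value result : Int) (shift : Nat) : Int :=
  if 0 < value then
    intToBcdLoopA (PySem.Int.floordiv value 10)
      (PySem.Int.bor result ((PySem.Int.mod value 10) <<< shift)) (shift + 4)
  else result
termination_by value.toNat
decreasing_by
  have h1 : PySem.Int.floordiv value 10 = value / 10 :=
    PySem.Int.floordiv_eq_ediv_of_pos (by omega)
  rw [h1]; omega

def int_to_bcd_py (value : Int) : Int :=
  let value' : Int := if value < 0 then 0 else value
  intToBcdLoopA value' 0 0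

-- ===== PORT B =====
def int_to_bcd_py_alt (value : Int) : Int :=
  if value ≤ 0 then 0
  else PySem.Int.bor (int_to_bcd_py_alt (PySem.Int.floordiv value 10) <<< (4 : Nat))
         (PySem.Int.mod value 10)
termination_by value.toNat
decreasing_by
  have h1 : PySem.Int.floordiv value 10 = value / 10 :=
    PySem.Int.floordiv_eq_ediv_of_pos (by omega)
  rw [h1]; omega

-- ===== PRECONDITION & SPEC =====
def Spec_int_to_bcd_py (value : Int) (out : Int) : Prop := out = int_to_bcd_py_alt value
instance (value : Int) (out : Int) : Decidable (Spec_int_to_bcd_py value out) := by unfold Spec_int_to_bcd_py; infer_instance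

-- ===== CLAIM (what is proved, stated in full; the proofs are below) =====
def Claim_equal_int_to_bcd_py : Prop := ∀ (value : Int), Dom_int_to_bcd_py value → Spec_int_to_bcd_py value (int_to_bcd_py value)

-- ===== LEMMAS AND PROOFS =====

theorem pv_toNat_two_pow (s : Nat) : ((2:Int) ^ s).toNat = 2 ^ s := by
  induction s with
  | zero => rfl
  | succ n ih =>
    rw [pow_succ, pow_succ, Int.toNat_mul (by positivity) (by norm_num), ih]
    rfl

theorem pv_bor_comm (a b : Int) : PySem.Int.bor a b = PySem.Int.bor b a := by
  unfold PySem.Int.bor; split_ifs <;> simp [Nat.lor_comm, Nat.land_comm]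

-- OR of a value below 2^s with a nonneg value shifted up by s is their sum (disjoint nibbles)
theorem pv_bor_shift (r d : Int) (s : Nat) (hr0 : 0 ≤ r) (hrs : r < 2 ^ s) (hd : 0 ≤ d) :
    PySem.Int.bor r (d <<< s) = r + d * 2 ^ s := by
  have hshift : d <<< s = d * 2 ^ s := by simp [Int.shiftLeft_eq]
  have hds : 0 ≤ d * 2 ^ s := by positivity
  rw [hshift]
  simp only [PySem.Int.bor, if_pos hr0, if_pos hds]
  have hrn : r.toNat < 2 ^ s := by
    have h := Int.toNat_of_nonneg hr0
    have h2 := pv_toNat_two_pow s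
    omega
  have hkey : d.toNat <<< s + r.toNat = d.toNat <<< s ||| r.toNat :=
    Nat.shiftLeft_add_eq_or_of_lt hrn d.toNat
  have htn : (d * 2 ^ s).toNat = d.toNat <<< s := by
    rw [Nat.shiftLeft_eq, Int.toNat_mul hd (by positivity), pv_toNat_two_pow]
  rw [htn, Nat.lor_comm, ← hkey, Nat.shiftLeft_eq]
  push_cast
  rw [Int.toNat_of_nonneg hd, Int.toNat_of_nonneg hr0]
  ring

theorem pv_alt_nonpos (v : Int) (h : v ≤ 0) : int_to_bcd_py_alt v = 0 := by
  rw [int_to_bcd_py_alt]; simp [h]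

-- B's recursion step as plain arithmetic, together with nonnegativity of its result
theorem pv_alt_step : ∀ (n : Nat) (v : Int), v.toNat = n → 0 ≤ int_to_bcd_py_alt v ∧
    (0 < v → int_to_bcd_py_alt v =
      16 * int_to_bcd_py_alt (PySem.Int.floordiv v 10) + PySem.Int.mod v 10) := by
  intro n
  induction n using Nat.strong_induction_on with
  | _ n ih =>
    intro v hn
    by_cases hle : v ≤ 0
    · rw [pv_alt_nonpos v hle]
      exact ⟨le_rfl, fun hpos => absurd hpos (by omega)⟩
    · have hpos : 0 < v := by omega
      have hfd : PySem.Int.floordiv v 10 = v / 10 :=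
        PySem.Int.floordiv_eq_ediv_of_pos (by omega)
      have hm0 : 0 ≤ PySem.Int.mod v 10 := PySem.Int.mod_nonneg v (by omega)
      have hmlt : PySem.Int.mod v 10 < 10 := PySem.Int.mod_lt v (by omega)
      have hq := (ih (v / 10).toNat (by omega) (v / 10) rfl).1
      rw [← hfd] at hq
      have hbody : int_to_bcd_py_alt v =
          PySem.Int.bor (int_to_bcd_py_alt (PySem.Int.floordiv v 10) <<< (4 : Nat))
            (PySem.Int.mod v 10) := by
        rw [int_to_bcd_py_alt, if_neg hle]
      have hsum := pv_bor_shift (PySem.Int.mod v 10)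
        (int_to_bcd_py_alt (PySem.Int.floordiv v 10)) 4 hm0
        (lt_trans hmlt (by norm_num)) hq
      rw [hbody, pv_bor_comm, hsum]
      constructor
      · nlinarith
      · intro _; ring
    
theorem pv_loop_inv : ∀ (n : Nat) (v r : Int) (s : Nat), v.toNat = n → 0 ≤ v → 0 ≤ r →
    r < 2 ^ s → intToBcdLoopA v r s = r + int_to_bcd_py_alt v * 2 ^ s := by
  intro n
  induction n using Nat.strong_induction_on with
  | _ n ih =>
    intro v r s hn hv hr hrs
    rw [intToBcdLoopA]
    by_cases hpos : 0 < v
    · rw [if_pos hpos]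
      have hfd : PySem.Int.floordiv v 10 = v / 10 :=
        PySem.Int.floordiv_eq_ediv_of_pos (by omega)
      have hq0 : 0 ≤ v / 10 := by omega
      have hm0 : 0 ≤ PySem.Int.mod v 10 := PySem.Int.mod_nonneg v (by omega)
      have hmlt : PySem.Int.mod v 10 < 10 := PySem.Int.mod_lt v (by omega)
      have hbor : PySem.Int.bor r (PySem.Int.mod v 10 <<< s)
          = r + PySem.Int.mod v 10 * 2 ^ s := pv_bor_shift r _ s hr hrs hm0
      rw [hbor]
      have h2s : (0:Int) < 2 ^ s := by positivity
      have hr'lt : r + PySem.Int.mod v 10 * 2 ^ s < 2 ^ (s + 4) := by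
        have h16 : (2 : Int) ^ (s + 4) = 16 * 2 ^ s := by ring
        nlinarith
      have hih := ih (v / 10).toNat (by omega) (v / 10)
        (r + PySem.Int.mod v 10 * 2 ^ s) (s + 4) rfl hq0 (by positivity) hr'lt
      rw [hfd, hih]
      have hstep := (pv_alt_step v.toNat v rfl).2 hpos
      rw [hfd] at hstep
      rw [hstep]
      ring
    · rw [if_neg hpos]
      have hv0 : v = 0 := by omega
      rw [hv0, pv_alt_nonpos 0 le_rfl]
      ring

-- ===== VERDICT (by name: the statement is the Claim_ definition above) =====
theorem int_to_bcd_py_spec : Claim_equal_int_to_bcd_py := by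
  intro value _
  unfold Spec_int_to_bcd_py int_to_bcd_py
  by_cases h : value < 0
  · simp only [if_pos h]
    rw [pv_loop_inv 0 0 0 0 rfl le_rfl le_rfl (by norm_num),
        pv_alt_nonpos 0 le_rfl, pv_alt_nonpos value (by omega)]
    ring
  · simp only [if_neg h]
    rw [pv_loop_inv value.toNat value 0 0 rfl (by omega) le_rfl (by norm_num)]
    ring
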